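-- pv_equiv track=rewrite | github.com/monistdavid/human-books | technology and idea/chatbot evolution/chat_aws_3_update.py | delete_first
-- ===== SOURCE A (Python) =====
-- def get_sentence_list(sentence):
--     sentence_list = []
--     for i in sentence.split(","):
--         for il in i.split("!"):
--             for ill in il.split("?"):
--                 for illl in ill.split("."):
--                     sentence_list.append(illl)
--     return sentence_list
--
-- def delete_first(sentence, context):
--     same_number = 0
--     sentence_list = get_sentence_list(sentence)
--     skip = False
--     if len(context) <= 5:
--         return ""
--     if len(sentence_list[0]) <= 5:
--         sentence_list = sentence_list[1:]
--     for i in sentence_list[0].split():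
--         if i in context:
--             same_number += 1
--     if same_number >= (len(sentence_list[0].split()) // 2):
--         return sentence_list[0]
--     else:
--         return ""
-- ===== SOURCE B (Python) =====
-- def delete_first(sentence, context):
--     # Single left-to-right scan: find the first delimiter-free token directly,
--     # never building the full token list.
--     if len(context) <= 5:
--         return ""
--     n = len(sentence)
--     i = 0
--     while i < n and sentence[i] not in ",!?.":
--         i += 1
--     tok = sentence[:i]
--     if len(tok) <= 5:
--         j = i + 1
--         k = j
--         while k < n and sentence[k] not in ",!?.":
--             k += 1
--         tok = sentence[j:k]
--     words = tok.split()
--     same = sum(1 for w in words if w in context)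
--     return tok if same >= len(words) // 2 else ""
-- ===== Notes on version B (the rewrite author's own statement) =====
-- stated objective: alternative
-- what changed: A tokenizes the whole sentence with four nested split passes into a full token list and then indexes it; B does a single left-to-right character scan that extracts only the first (and, if the first is short, the second) delimiter-free token, never building the token list.
import Mathlib
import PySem

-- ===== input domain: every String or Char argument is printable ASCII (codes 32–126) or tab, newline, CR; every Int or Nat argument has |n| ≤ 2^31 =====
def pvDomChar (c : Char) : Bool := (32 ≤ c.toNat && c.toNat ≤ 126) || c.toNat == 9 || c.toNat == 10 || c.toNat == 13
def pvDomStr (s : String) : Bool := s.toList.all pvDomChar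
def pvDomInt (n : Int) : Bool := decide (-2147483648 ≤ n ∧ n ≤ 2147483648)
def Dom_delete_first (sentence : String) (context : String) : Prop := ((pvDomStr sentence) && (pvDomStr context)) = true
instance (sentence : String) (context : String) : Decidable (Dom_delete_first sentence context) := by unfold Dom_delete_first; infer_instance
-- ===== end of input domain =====

-- B replaces A's four nested split passes (which tokenize the whole sentence into a list)
-- by a single left-to-right scan that extracts only the first (and, if needed, second)
-- delimiter-free token; objective: alternative decomposition.

-- ===== PORT A =====
def get_sentence_list (sentence : String) : List String :=
  ((PySem.Str.split? sentence ",").getD []).foldl (fun sl i =>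
    ((PySem.Str.split? i "!").getD []).foldl (fun sl il =>
      ((PySem.Str.split? il "?").getD []).foldl (fun sl ill =>
        ((PySem.Str.split? ill ".").getD []).foldl (fun sl illl => sl ++ [illl]) sl) sl) sl) []

def delete_first (sentence : String) (context : String) : String :=
  let same_number : Int := 0
  let sentence_list := get_sentence_list sentence
  if PySem.Str.len context ≤ 5 then ""
  else
    let sentence_list :=
      if PySem.Str.len ((PySem.List.pyGet? sentence_list 0).getD "") ≤ 5
      then PySem.List.slice sentence_list (some 1) none
      else sentence_list
    let first := (PySem.List.pyGet? sentence_list 0).getD ""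
    let words := PySem.Str.split₀ first
    let same_number := words.foldl (fun sn i => if PySem.Str.isIn i context then sn + 1 else sn) same_number
    if PySem.Int.floordiv (words.length : Int) 2 ≤ same_number then first else ""

-- ===== PORT B =====
def pvIsDelim (c : Char) : Bool := c == ',' || c == '!' || c == '?' || c == '.'

/-- One step of Source B's character scan: the token before the first delimiter,
    and the remainder after that delimiter (`none` if no delimiter occurs). -/
def pvScan : List Char → List Char × Option (List Char)
  | [] => ([], none)
  | c :: cs =>
    if pvIsDelim c then ([], some cs)
    else
      let r := pvScan cs
      (c :: r.1, r.2)

def delete_first_alt (sentence : String) (context : String) : String :=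
  if context.length ≤ 5 then ""
  else
    let s1 := pvScan sentence.toList
    let tok :=
      if s1.1.length ≤ 5 then
        match s1.2 with
        | none => []
        | some r => (pvScan r).1
      else s1.1
    let words := PySem.Chars.split₀ tok
    let same : Nat := words.foldl (fun sn w => if PySem.Chars.isIn w context.toList then sn + 1 else sn) 0
    if words.length / 2 ≤ same then String.ofList tok else ""

-- ===== PRECONDITION & SPEC =====
-- Pre_ excludes exactly the inputs on which the Python A raises IndexError: context longer
-- than 5 and sentence a single delimiter-free token of length ≤ 5, so that dropping the
-- short first token leaves an empty list to index.
def Pre_delete_first (sentence : String) (context : String) : Prop :=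
  context.length ≤ 5 ∨ sentence.toList.any pvIsDelim = true ∨ 5 < sentence.length

instance (sentence : String) (context : String) : Decidable (Pre_delete_first sentence context) := by
  unfold Pre_delete_first; infer_instance

def pvWitness_delete_first : String × String := ("Hello there, friend.", "well hello there friend")

def Spec_delete_first (sentence : String) (context : String) (out : String) : Prop := out = delete_first_alt sentence context
instance (sentence : String) (context : String) (out : String) : Decidable (Spec_delete_first sentence context out) := by unfold Spec_delete_first; infer_instance

-- ===== CLAIM (what is proved, stated in full; the proofs are below) =====
def Claim_equal_delete_first : Prop := ∀ (sentence : String) (context : String), Dom_delete_first sentence context → Pre_delete_first sentence context → Spec_delete_first sentence context (delete_first sentence context)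

-- ===== LEMMAS AND PROOFS =====

/-- Head-extension of a token list (the "current piece continues into the first token"). -/
def pvConsHead (pre : List Char) : List (List Char) → List (List Char)
  | [] => [pre]
  | t :: ts => (pre ++ t) :: ts

/-- Structural split of a char list on a delimiter predicate, keeping empty pieces. -/
def pvSplitP (p : Char → Bool) : List Char → List (List Char)
  | [] => [[]]
  | c :: rest => if p c then [] :: pvSplitP p rest else pvConsHead [c] (pvSplitP p rest)

theorem pvSplitP_ne_nil (p : Char → Bool) (l : List Char) : pvSplitP p l ≠ [] := by
  cases l with
  | nil => simp [pvSplitP]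
  | cons c rest =>
    simp only [pvSplitP]
    split
    · simp
    · cases h : pvSplitP p rest <;> simp [pvConsHead]

theorem pvConsHead_consHead (a b : List Char) (L : List (List Char)) :
    pvConsHead a (pvConsHead b L) = pvConsHead (a ++ b) L := by
  cases L <;> simp [pvConsHead]

theorem pvConsHead_nil_of_ne (L : List (List Char)) (h : L ≠ []) : pvConsHead [] L = L := by
  cases L with
  | nil => exact absurd rfl h
  | cons t ts => simp [pvConsHead]

theorem splitOn_go_eq (d : Char) (fuel : Nat) (l cur : List Char) (acc : List (List Char))
    (h : l.length ≤ fuel) :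
    PySem.Chars.splitOn.go [d] fuel l cur acc
      = acc.reverse ++ pvConsHead cur.reverse (pvSplitP (fun c => d == c) l) := by
  induction fuel generalizing l cur acc with
  | zero =>
    have : l = [] := List.eq_nil_of_length_eq_zero (Nat.le_zero.mp h)
    subst this
    simp only [PySem.Chars.splitOn.go, pvSplitP, pvConsHead]
    simp
  | succ n ih =>
    cases l with
    | nil =>
      simp only [PySem.Chars.splitOn.go, pvSplitP, pvConsHead]
      simp
    | cons c rest =>
      simp only [PySem.Chars.splitOn.go]
      simp only [List.isPrefixOf, Bool.and_true]
      by_cases hd : (d == c) = true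
      · simp only [hd, if_pos, List.length_cons, List.drop_succ_cons, List.length_nil, List.drop_zero]
        rw [ih rest [] (cur.reverse :: acc) (by simpa using Nat.le_of_succ_le_succ h)]
        simp only [List.reverse_nil]
        rw [pvConsHead_nil_of_ne _ (pvSplitP_ne_nil _ _)]
        simp [pvSplitP, hd, pvConsHead]
      · rw [if_neg (by simpa using hd)]
        rw [ih rest (c :: cur) acc (by simpa using Nat.le_of_succ_le_succ h)]
        simp [pvSplitP, hd, pvConsHead_consHead]

theorem splitOn_singleton (d : Char) (l : List Char) :
    PySem.Chars.splitOn l [d] = pvSplitP (fun c => d == c) l := by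
  unfold PySem.Chars.splitOn
  rw [splitOn_go_eq d (l.length + 1) l [] [] (Nat.le_succ _)]
  simp only [List.reverse_nil]
  rw [pvConsHead_nil_of_ne _ (pvSplitP_ne_nil _ _)]
  simp

theorem pvConsHead_append (pre : List Char) (L M : List (List Char)) (h : L ≠ []) :
    pvConsHead pre L ++ M = pvConsHead pre (L ++ M) := by
  cases L with
  | nil => exact absurd rfl h
  | cons t ts => simp [pvConsHead]

theorem pvSplitP_flatMap (p q : Char → Bool) (cs : List Char) :
    (pvSplitP p cs).flatMap (pvSplitP q) = pvSplitP (fun c => p c || q c) cs := by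
  induction cs with
  | nil => simp [pvSplitP]
  | cons c rest ih =>
    obtain ⟨t, ts, hts⟩ : ∃ t ts, pvSplitP p rest = t :: ts := by
      cases h : pvSplitP p rest with
      | nil => exact absurd h (pvSplitP_ne_nil p rest)
      | cons t ts => exact ⟨t, ts, rfl⟩
    by_cases hp : p c = true
    · simp only [pvSplitP, hp, if_pos, Bool.true_or, List.flatMap_cons]
      rw [ih]
      simp [pvSplitP]
    · simp only [pvSplitP, hp, Bool.false_or, if_neg, Bool.not_eq_true]
      rw [hts]
      simp only [pvConsHead, List.flatMap_cons, List.singleton_append]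
      by_cases hq : q c = true
      · simp only [hq, if_pos]
        have : pvSplitP q (c :: t) = [] :: pvSplitP q t := by simp [pvSplitP, hq]
        rw [this]
        have h2 : pvSplitP q t ++ ts.flatMap (pvSplitP q) = (t :: ts).flatMap (pvSplitP q) := by
          simp
        rw [List.cons_append, h2, ← hts, ih]
      · have hsp : pvSplitP q (c :: t) = pvConsHead [c] (pvSplitP q t) := by
          simp [pvSplitP, hq]
        rw [if_neg (by simpa using hq), hsp]
        rw [pvConsHead_append _ _ _ (pvSplitP_ne_nil q t)]
        have h2 : pvSplitP q t ++ ts.flatMap (pvSplitP q) = (t :: ts).flatMap (pvSplitP q) := by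
          simp
        rw [h2, ← hts, ih]
        cases pvSplitP (fun c => p c || q c) rest <;> simp [pvConsHead]

theorem pvSplitP_congr (p q : Char → Bool) (h : ∀ c, p c = q c) (l : List Char) :
    pvSplitP p l = pvSplitP q l := by
  induction l with
  | nil => rfl
  | cons c rest ih => simp only [pvSplitP, h c, ih]

theorem flatMap_split_map (q : Char → Bool) (X : List (List Char)) :
    (X.map String.ofList).flatMap (fun t => (pvSplitP q t.toList).map String.ofList)
      = (X.flatMap (pvSplitP q)).map String.ofList := by
  induction X with
  | nil => rfl
  | cons t ts ih => simp [ih]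

theorem split_getD (t : String) (d : Char) (sd : String) (hsd : sd.toList = [d]) :
    (PySem.Str.split? t sd).getD [] = (pvSplitP (fun c => d == c) t.toList).map String.ofList := by
  simp [PySem.Str.split?, PySem.Chars.split?, hsd, splitOn_singleton]

theorem get_sentence_list_eq (s : String) :
    get_sentence_list s = (pvSplitP pvIsDelim s.toList).map String.ofList := by
  unfold get_sentence_list
  simp only [PySem.List.foldl_append_eq_flatMap, List.nil_append,
    split_getD _ ',' "," (by decide), split_getD _ '!' "!" (by decide),
    split_getD _ '?' "?" (by decide), split_getD _ '.' "." (by decide)]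
  have h34 : ∀ x : String,
      ((pvSplitP (fun c => '?' == c) x.toList).map String.ofList).flatMap
        (fun y => (pvSplitP (fun c => '.' == c) y.toList).map String.ofList)
      = (pvSplitP (fun c => ('?' == c) || ('.' == c)) x.toList).map String.ofList := by
    intro x
    rw [flatMap_split_map, pvSplitP_flatMap]
  have h234 : ∀ x : String,
      ((pvSplitP (fun c => '!' == c) x.toList).map String.ofList).flatMap
        (fun y => (pvSplitP (fun c => ('?' == c) || ('.' == c)) y.toList).map String.ofList)
      = (pvSplitP (fun c => ('!' == c) || (('?' == c) || ('.' == c))) x.toList).map String.ofList := by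
    intro x
    rw [flatMap_split_map, pvSplitP_flatMap]
  have h1234 :
      ((pvSplitP (fun c => ',' == c) s.toList).map String.ofList).flatMap
        (fun y => (pvSplitP (fun c => ('!' == c) || (('?' == c) || ('.' == c))) y.toList).map String.ofList)
      = (pvSplitP (fun c => (',' == c) || (('!' == c) || (('?' == c) || ('.' == c)))) s.toList).map String.ofList := by
    rw [flatMap_split_map, pvSplitP_flatMap]
  simp only [List.flatMap_singleton', h34, h234, h1234]
  congr 1
  apply pvSplitP_congr
  intro c
  simp [pvIsDelim, Bool.beq_comm, Bool.or_assoc]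

theorem splitP_eq_scan (cs : List Char) :
    pvSplitP pvIsDelim cs
      = (pvScan cs).1 :: (match (pvScan cs).2 with | none => [] | some r => pvSplitP pvIsDelim r) := by
  induction cs with
  | nil => rfl
  | cons c rest ih =>
    by_cases h : pvIsDelim c = true
    · simp [pvSplitP, pvScan, h]
    · simp only [pvSplitP, pvScan, h, if_neg, Bool.not_eq_true]
      rw [ih]
      simp [pvConsHead]

theorem foldl_count_int {α : Type} (p : α → Bool) (L : List α) (a : Int) :
    L.foldl (fun sn i => if p i then sn + 1 else sn) a = a + L.countP p := by
  induction L generalizing a with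
  | nil => simp
  | cons x xs ih =>
    by_cases h : p x = true <;> simp [h, ih] <;> push_cast <;> ring

theorem foldl_count_nat {α : Type} (p : α → Bool) (L : List α) (a : Nat) :
    L.foldl (fun sn i => if p i then sn + 1 else sn) a = a + L.countP p := by
  induction L generalizing a with
  | nil => simp
  | cons x xs ih =>
    by_cases h : p x = true <;> simp [h, ih] <;> omega

theorem finish_eq (tok : List Char) (c : String) :
    (if PySem.Int.floordiv ((PySem.Str.split₀ (String.ofList tok)).length : Int) 2 ≤
        (PySem.Str.split₀ (String.ofList tok)).foldl
          (fun sn i => if PySem.Str.isIn i c then sn + 1 else sn) (0 : Int)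
     then String.ofList tok else "")
    = (if (PySem.Chars.split₀ tok).length / 2 ≤
        (PySem.Chars.split₀ tok).foldl
          (fun sn w => if PySem.Chars.isIn w c.toList then sn + 1 else sn) (0 : Nat)
       then String.ofList tok else "") := by
  have hW : (PySem.Str.split₀ (String.ofList tok)).map String.toList = PySem.Chars.split₀ tok := by
    rw [PySem.Str.split₀_map_toList, String.toList_ofList]
  have hlen : (PySem.Chars.split₀ tok).length = (PySem.Str.split₀ (String.ofList tok)).length := by
    rw [← hW, List.length_map]
  have hcnt : (PySem.Chars.split₀ tok).countP (fun w => PySem.Chars.isIn w c.toList)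
      = (PySem.Str.split₀ (String.ofList tok)).countP (fun i => PySem.Str.isIn i c) := by
    rw [← hW, List.countP_map]
    apply List.countP_congr
    intro w _
    simp [Function.comp, PySem.Str.isIn_eq]
  rw [foldl_count_int, foldl_count_nat, hlen, hcnt]
  have hfd : PySem.Int.floordiv ((PySem.Str.split₀ (String.ofList tok)).length : Int) 2
      = ((PySem.Str.split₀ (String.ofList tok)).length : Int) / 2 := by
    rw [PySem.Int.floordiv, Int.fdiv_eq_ediv]
    norm_num
  rw [hfd]
  have hiff :
      ((((PySem.Str.split₀ (String.ofList tok)).length : Int)) / 2 ≤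
        0 + ((PySem.Str.split₀ (String.ofList tok)).countP (fun i => PySem.Str.isIn i c) : Int))
      ↔ ((PySem.Str.split₀ (String.ofList tok)).length / 2 ≤
        0 + (PySem.Str.split₀ (String.ofList tok)).countP (fun i => PySem.Str.isIn i c)) := by
    omega
  rw [if_congr hiff rfl rfl]

theorem pyGet0_getD (x : String) (L : List String) :
    (PySem.List.pyGet? (x :: L) 0).getD "" = x := by
  simp [PySem.List.pyGet?, PySem.List.pyIdx?]

theorem ports_agree (s c : String) : delete_first s c = delete_first_alt s c := by
  have hlenof : ∀ t : List Char, PySem.Str.len (String.ofList t) = (t.length : Int) := by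
    intro t
    simp [PySem.Str.len, String.toList_ofList]
  have hslice : ∀ L : List String, PySem.List.slice L (some 1) none = L.drop 1 := by
    intro L
    rw [PySem.List.slice_from _ (by norm_num)]
    norm_num
  unfold delete_first delete_first_alt
  simp only [get_sentence_list_eq]
  by_cases hc : c.length ≤ 5
  · rw [if_pos (show PySem.Str.len c ≤ 5 by simp only [PySem.Str.len]; push_cast; simp; omega),
      if_pos hc]
  · rw [if_neg (show ¬ PySem.Str.len c ≤ 5 by simp only [PySem.Str.len]; push_cast; simp; omega),
      if_neg hc]
    rw [splitP_eq_scan s.toList]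
    cases hsc : (pvScan s.toList).2 with
    | none =>
      simp only [hsc, List.map_cons, List.map_nil, pyGet0_getD, hlenof]
      by_cases ht : (pvScan s.toList).1.length ≤ 5
      · rw [if_pos (show ((pvScan s.toList).1.length : Int) ≤ 5 by exact_mod_cast ht), if_pos ht]
        rw [hslice]
        simp only [List.drop_succ_cons, List.drop_nil]
        rw [show (PySem.List.pyGet? ([] : List String) 0).getD "" = String.ofList [] from by
          simp [PySem.List.pyGet?, PySem.List.pyIdx?]]
        exact finish_eq [] c
      · rw [if_neg (show ¬ ((pvScan s.toList).1.length : Int) ≤ 5 by exact_mod_cast ht),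
          if_neg ht, pyGet0_getD]
        exact finish_eq _ c
    | some r =>
      simp only [hsc, List.map_cons, List.map_nil, pyGet0_getD, hlenof]
      by_cases ht : (pvScan s.toList).1.length ≤ 5
      · rw [if_pos (show ((pvScan s.toList).1.length : Int) ≤ 5 by exact_mod_cast ht), if_pos ht]
        rw [hslice]
        simp only [List.drop_succ_cons, List.drop_zero]
        rw [splitP_eq_scan r]
        simp only [List.map_cons, pyGet0_getD]
        exact finish_eq _ c
      · rw [if_neg (show ¬ ((pvScan s.toList).1.length : Int) ≤ 5 by exact_mod_cast ht),
          if_neg ht, pyGet0_getD]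
        exact finish_eq _ c

-- ===== VERDICT (by name: the statement is the Claim_ definition above) =====
theorem delete_first_spec : Claim_equal_delete_first := by
  intro s c _ _
  unfold Spec_delete_first
  exact ports_agree s c
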